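-- pv_equiv track=rewrite | github.com/StrangeresAnn/HomeWorkPython | Ex_3/Task5.py | get_fibonachi
-- ===== SOURCE A (Python) =====
-- def get_fibonachi(k):
--     f_nums = []
--     a, b = 1, 1
--     for i in range(k):
--         f_nums.append(a)
--         a, b = b, a + b
--
--     a, b = 0, 1
--     for i in range (k + 1):
--         f_nums.insert(0, a)
--         a, b = b, a - b
--     return f_nums
-- ===== SOURCE B (Python) =====
-- def get_fibonachi(k):
--     if k < 0:
--         return []
--     fib = [0, 1]
--     for _ in range(k - 1):
--         fib.append(fib[-1] + fib[-2])
--     neg = [(-1) ** (i + 1) * fib[i] for i in range(k, -1, -1)]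
--     return neg + fib[1:k + 1]
-- ===== Notes on version B (the rewrite author's own statement) =====
-- stated objective: simpler
-- what changed: B builds a single forward Fibonacci array and derives the negative-index half by the closed-form sign identity F(-m) = (-1)**(m+1)*F(m), eliminating A's second backward-recurrence loop and its front-insertion into the result list.
import Mathlib
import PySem

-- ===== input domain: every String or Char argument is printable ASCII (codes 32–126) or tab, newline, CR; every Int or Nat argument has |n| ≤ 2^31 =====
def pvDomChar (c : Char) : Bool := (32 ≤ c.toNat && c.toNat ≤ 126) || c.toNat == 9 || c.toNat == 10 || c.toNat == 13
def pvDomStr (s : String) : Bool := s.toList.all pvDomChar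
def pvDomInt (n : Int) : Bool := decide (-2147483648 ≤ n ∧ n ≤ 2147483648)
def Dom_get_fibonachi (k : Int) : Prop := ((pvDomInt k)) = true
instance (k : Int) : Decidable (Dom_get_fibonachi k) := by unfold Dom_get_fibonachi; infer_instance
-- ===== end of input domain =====

-- B replaces A's second (backward-recurrence, front-insertion) loop by one forward
-- Fibonacci array plus the sign identity F(-m) = (-1)^(m+1) * F(m); objective: simpler.

-- ===== PORT A =====
-- loop body of A's first loop: f_nums.append(a); a, b = b, a + b
def pvStepA1 (st : List Int × Int × Int) : List Int × Int × Int :=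
  (st.1 ++ [st.2.1], st.2.2, st.2.1 + st.2.2)
-- loop body of A's second loop: f_nums.insert(0, a); a, b = b, a - b
def pvStepA2 (st : List Int × Int × Int) : List Int × Int × Int :=
  (st.2.1 :: st.1, st.2.2, st.2.1 - st.2.2)

def get_fibonachi (k : Int) : List Int :=
  let s1 := (PySem.List.pyRange 0 k 1).foldl (fun st _ => pvStepA1 st) ([], 1, 1)
  let s2 := (PySem.List.pyRange 0 (k + 1) 1).foldl (fun st _ => pvStepA2 st) (s1.1, 0, 1)
  s2.1

-- ===== PORT B =====
-- loop body of B's loop: fib.append(fib[-1] + fib[-2]); the .getD 0 only totalises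
-- the indexing (fib always has ≥ 2 elements, so Python never raises here)
def pvStepB (f : List Int) : List Int :=
  f ++ [(PySem.List.pyGet? f (-1)).getD 0 + (PySem.List.pyGet? f (-2)).getD 0]

def get_fibonachi_alt (k : Int) : List Int :=
  if k < 0 then []
  else
    let fib := (PySem.List.pyRange 0 (k - 1) 1).foldl (fun f _ => pvStepB f) [0, 1]
    -- (-1) ** (i + 1): i runs over k..0, so i + 1 ≥ 0 and .toNat is exact
    let neg := (PySem.List.pyRange k (-1) (-1)).map
      (fun i => (-1) ^ (i + 1).toNat * (PySem.List.pyGet? fib i).getD 0)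
    neg ++ PySem.List.slice fib (some 1) (some (k + 1))

-- ===== PRECONDITION & SPEC =====
def Spec_get_fibonachi (k : Int) (out : List Int) : Prop := out = get_fibonachi_alt k
instance (k : Int) (out : List Int) : Decidable (Spec_get_fibonachi k out) := by unfold Spec_get_fibonachi; infer_instance

-- ===== CLAIM (what is proved, stated in full; the proofs are below) =====
def Claim_equal_get_fibonachi : Prop := ∀ (k : Int), Dom_get_fibonachi k → Spec_get_fibonachi k (get_fibonachi k)

-- ===== LEMMAS AND PROOFS =====

-- mathematical Fibonacci numbers (as Int)
def fibZ : Nat → Int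
  | 0 => 0
  | 1 => 1
  | n + 2 => fibZ n + fibZ (n + 1)

-- value of A's second-loop variable a after m steps: F(-m) = (-1)^(m+1) * F(m)
def negfib (m : Nat) : Int := (-1) ^ (m + 1) * fibZ m
-- value of A's second-loop variable b after m steps
def negaux (m : Nat) : Int := (-1) ^ m * fibZ (m + 1)

def fibList (n : Nat) : List Int := (List.range n).map fibZ

-- iterate a state transformer n times
def pvIter {β : Type} (f : β → β) : Nat → β → β
  | 0, s => s
  | n + 1, s => pvIter f n (f s)

theorem foldl_ignore {α β : Type} (f : β → β) (l : List α) (s : β) :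
    l.foldl (fun s _ => f s) s = pvIter f l.length s := by
  induction l generalizing s with
  | nil => rfl
  | cons x xs ih => simp [List.foldl_cons, pvIter, ih]

theorem iterA1 (n : Nat) : ∀ (m : Nat) (l : List Int),
    pvIter pvStepA1 n (l, fibZ (m + 1), fibZ (m + 2)) =
      (l ++ (List.range n).map (fun i => fibZ (m + 1 + i)), fibZ (m + 1 + n), fibZ (m + 2 + n)) := by
  induction n with
  | zero => intro m l; simp [pvIter]
  | succ n ih =>
      intro m l
      simp only [pvIter, pvStepA1]
      rw [show (fibZ (m + 1) + fibZ (m + 2) : Int) = fibZ (m + 1 + 2) from rfl,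
          show fibZ (m + 2) = fibZ (m + 1 + 1) from rfl, ih (m + 1)]
      have hf : (fun i : Nat => fibZ (m + 1 + 1 + i)) = fun i : Nat => fibZ (m + 1 + (i + 1)) := by
        funext i; congr 1; omega
      have hl : l ++ [fibZ (m + 1)] ++ (List.range n).map (fun i : Nat => fibZ (m + 1 + 1 + i)) =
          l ++ (List.range (n + 1)).map (fun i : Nat => fibZ (m + 1 + i)) := by
        rw [hf, List.range_succ_eq_map, List.map_cons, List.map_map, List.append_assoc,
            List.singleton_append]
        simp [Function.comp]
      rw [hl, show m + 1 + 1 + n = m + 1 + (n + 1) from by omega,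
          show m + 1 + 2 + n = m + 2 + (n + 1) from by omega]

theorem iterA2 (n : Nat) : ∀ (j : Nat) (l : List Int),
    pvIter pvStepA2 n (l, negfib j, negaux j) =
      (((List.range n).map (fun i => negfib (j + i))).reverse ++ l, negfib (j + n), negaux (j + n)) := by
  induction n with
  | zero => intro j l; simp [pvIter]
  | succ n ih =>
      intro j l
      have hb : negaux j = negfib (j + 1) := by
        simp [negaux, negfib, pow_succ]
      have hc : negfib j - negaux j = negaux (j + 1) := by
        have h2 : fibZ (j + 2) = fibZ j + fibZ (j + 1) := rfl
        simp [negaux, negfib, pow_succ, h2]; ring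
      simp only [pvIter, pvStepA2]
      rw [hc, hb, ih (j + 1)]
      have hf : (fun i : Nat => negfib (j + 1 + i)) = fun i : Nat => negfib (j + (i + 1)) := by
        funext i; congr 1; omega
      have hl : ((List.range n).map (fun i : Nat => negfib (j + 1 + i))).reverse ++
            (negfib j :: l) =
          ((List.range (n + 1)).map (fun i : Nat => negfib (j + i))).reverse ++ l := by
        rw [hf, List.range_succ_eq_map, List.map_cons, List.map_map, List.reverse_cons,
            List.append_assoc]
        simp [Function.comp]
      rw [hl, show j + 1 + n = j + (n + 1) from by omega]

theorem stepB_fibList (j : Nat) : pvStepB (fibList (j + 2)) = fibList (j + 3) := by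
  have hlen : (fibList (j + 2)).length = j + 2 := by simp [fibList]
  have h1 : PySem.List.pyGet? (fibList (j + 2)) (-1) = some (fibZ (j + 1)) := by
    rw [PySem.List.pyGet?_neg_ofNat (fibList (j + 2)) 1 (by omega) (by omega)]
    simp [fibList]
  have h2 : PySem.List.pyGet? (fibList (j + 2)) (-2) = some (fibZ j) := by
    rw [PySem.List.pyGet?_neg_ofNat (fibList (j + 2)) 2 (by omega) (by omega)]
    simp [fibList]
  have h3 : fibZ (j + 1) + fibZ j = fibZ (j + 2) := by
    rw [show fibZ (j + 2) = fibZ j + fibZ (j + 1) from rfl]; ring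
  simp only [pvStepB, h1, h2, Option.getD_some, h3]
  simp [fibList, List.range_succ]

theorem iterB (m : Nat) : ∀ (j : Nat),
    pvIter pvStepB m (fibList (j + 2)) = fibList (j + 2 + m) := by
  induction m with
  | zero => intro j; rfl
  | succ m ih =>
      intro j
      simp only [pvIter, stepB_fibList j]
      rw [show j + 3 = (j + 1) + 2 from rfl, ih (j + 1)]
      congr 1; omega

theorem rev_map_range (f : Nat → Int) (n : Nat) :
    ((List.range n).map f).reverse = (List.range n).map (fun j => f (n - 1 - j)) := by
  apply List.ext_getElem
  · simp
  · intro t h1 h2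
    simp at h1 h2 ⊢

theorem main_eq (k : Int) : get_fibonachi k = get_fibonachi_alt k := by
  by_cases hk : k < 0
  · have h1 : PySem.List.pyRange 0 k 1 = [] := PySem.List.pyRange_one_eq_nil (by omega)
    have h2 : PySem.List.pyRange 0 (k + 1) 1 = [] := PySem.List.pyRange_one_eq_nil (by omega)
    simp [get_fibonachi, get_fibonachi_alt, h1, h2, hk]
  · rw [not_lt] at hk
    obtain ⟨n, rfl⟩ : ∃ n : Nat, k = (n : Int) := ⟨k.toNat, (Int.toNat_of_nonneg hk).symm⟩
    clear hk
    have hlen1 : (PySem.List.pyRange 0 (n : Int) 1).length = n := by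
      rw [PySem.List.length_pyRange_one]; omega
    have hlen2 : (PySem.List.pyRange 0 ((n : Int) + 1) 1).length = n + 1 := by
      rw [PySem.List.length_pyRange_one]; omega
    have hlenB : (PySem.List.pyRange 0 ((n : Int) - 1) 1).length = n - 1 := by
      rw [PySem.List.length_pyRange_one]; omega
    -- A's first loop produces F(1) .. F(n)
    have hA1 : ((PySem.List.pyRange 0 (n : Int) 1).foldl (fun st _ => pvStepA1 st) ([], 1, 1)).1
        = (List.range n).map (fun i => fibZ (i + 1)) := by
      rw [foldl_ignore, hlen1,
          show (([], 1, 1) : List Int × Int × Int) = ([], fibZ (0 + 1), fibZ (0 + 2)) from by decide,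
          iterA1 n 0]
      simp only [List.nil_append]
      exact List.map_congr_left fun i _ => by congr 1; omega
    -- A's second loop prepends F(0), F(-1), .., F(-n)
    have hA2 : get_fibonachi (n : Int) =
        ((List.range (n + 1)).map negfib).reverse ++ (List.range n).map (fun i => fibZ (i + 1)) := by
      show ((PySem.List.pyRange 0 ((n : Int) + 1) 1).foldl (fun st _ => pvStepA2 st)
          (((PySem.List.pyRange 0 (n : Int) 1).foldl (fun st _ => pvStepA1 st) ([], 1, 1)).1, 0, 1)).1 = _
      have e0 : (0 : Int) = negfib 0 := by decide
      have e1 : (1 : Int) = negaux 0 := by decide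
      rw [hA1, foldl_ignore, hlen2, e0, e1, iterA2 (n + 1) 0]
      simp only []
      congr 1
      congr 1
      exact List.map_congr_left fun i _ => by congr 1; omega
    -- B's fib array
    have hBfib : ((PySem.List.pyRange 0 ((n : Int) - 1) 1).foldl (fun f _ => pvStepB f) [0, 1])
        = fibList ((n - 1) + 2) := by
      rw [foldl_ignore, hlenB, show ([0, 1] : List Int) = fibList (0 + 2) from by decide,
          iterB (n - 1) 0]
      congr 1; omega
    have hfib_get : ∀ j : Nat, j ≤ n →
        (PySem.List.pyGet? (fibList ((n - 1) + 2)) ((n : Int) - (j : Int))).getD 0 = fibZ (n - j) := by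
      intro j hj
      rw [show (n : Int) - (j : Int) = ((n - j : Nat) : Int) from by omega,
          PySem.List.pyGet?_natCast]
      simp [fibList, show n - j < (n - 1) + 2 from by omega]
    have hrange : PySem.List.pyRange (n : Int) (-1) (-1)
        = (List.range (n + 1)).map (fun j : Nat => (n : Int) - (j : Int)) := by
      rw [PySem.List.pyRange_neg_one]
      congr 1
    have hslice : ((fibList ((n - 1) + 2)).drop 1).take n
        = (List.range n).map (fun i => fibZ (i + 1)) := by
      apply List.ext_getElem
      · simp [fibList]; omega
      · intro t h1 h2
        simp only [fibList, List.getElem_take, List.getElem_drop, List.getElem_map,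
          List.getElem_range, List.length_map, List.length_range] at h1 h2 ⊢
        congr 1; omega
    have hB : get_fibonachi_alt (n : Int)
        = (List.range (n + 1)).map (fun j => negfib (n - j))
          ++ (List.range n).map (fun i => fibZ (i + 1)) := by
      show (if (n : Int) < 0 then [] else _) = _
      rw [if_neg (by omega)]
      show ((PySem.List.pyRange (n : Int) (-1) (-1)).map
            (fun i => (-1) ^ (i + 1).toNat * (PySem.List.pyGet?
              ((PySem.List.pyRange 0 ((n : Int) - 1) 1).foldl (fun f _ => pvStepB f) [0, 1]) i).getD 0))
          ++ PySem.List.slice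
              ((PySem.List.pyRange 0 ((n : Int) - 1) 1).foldl (fun f _ => pvStepB f) [0, 1])
              (some 1) (some ((n : Int) + 1)) = _
      rw [hBfib, hrange, List.map_map]
      congr 1
      · apply List.map_congr_left
        intro j hj
        rw [List.mem_range] at hj
        simp only [Function.comp]
        rw [show ((n : Int) - (j : Int) + 1).toNat = (n - j) + 1 from by omega,
            hfib_get j (by omega)]
        rfl
      · rw [PySem.List.slice_toNat (fibList ((n - 1) + 2)) (by omega) (by omega),
            show ((n : Int) + 1).toNat = n + 1 from by omega,
            show (1 : Int).toNat = 1 from rfl,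
            show n + 1 - 1 = n from rfl, hslice]
    rw [hA2, hB]
    congr 1
    rw [rev_map_range negfib (n + 1)]
    apply List.map_congr_left
    intro j _
    congr 1

-- ===== VERDICT (by name: the statement is the Claim_ definition above) =====
theorem get_fibonachi_spec : Claim_equal_get_fibonachi := by
  intro k _
  unfold Spec_get_fibonachi
  exact main_eq k
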